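-- pv_equiv track=rewrite | github.com/irisyn-ye/umsi | si506/labs/lab_11/lab_exercise_11.py | enrich_planet
-- ===== SOURCE A (Python) =====
-- def enrich_planet(planet, wookiee_planets, filters):
--     """Loops over the passed in < wookiee_planets > data to check if the passed in < planet >
--     'name' matches the 'name' in < wookiee_planets >.
--     If a match is obtained, it updates the < planet > dictionary with the new key-value pairs
--     from < wookiee_planets >.
--     Loops over the < planet > dictionary's items to check if each key is in the passed in
--     < filters > list. If the key is present in < filters >, it assigns the key-vaue pair
--     to a new filtered dictionary.
--
--     Parameters:
--         planet (dict): a dictionary representation of the decoded JSON that contains planet attributes.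
--         wookiee_planets (list): a list of dictionaries containing planet attributes sourced from Wookieepedia.
--         filters (tuple): a list containing names of planet attributes.
--
--     Returns:
--         dict: an enriched dictionary of key-value pairs representing a planet.
--     """
--     # pass
--     planet_update = {}
--     for wookiee_planet in wookiee_planets:
--         if planet['name'] == wookiee_planet['name']:
--             planet.update(wookiee_planet)
--             for key, val in planet.items():
--                 # val = wookiee_planet[key]
--                 if key in filters:
--                     planet_update[key] = val
--     return planet_update
-- ===== SOURCE B (Python) =====
-- def enrich_planet(planet, wookiee_planets, filters):
--     # Select the matching wookiee records up front, flatten planet + matches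
--     # into one key-value stream, and let dict assignment (last value wins,
--     # first position wins) do both the merging and the filtering in a single
--     # streaming pass; < planet > is still enriched in place like the original.
--     matches = [wp for wp in wookiee_planets if planet['name'] == wp['name']]
--     entries = list(planet.items()) + [item for wp in matches for item in wp.items()]
--     for wp in matches:
--         planet.update(wp)
--     if not matches:
--         return {}
--     allowed = set(filters)
--     result = {}
--     for key, val in entries:
--         if key in allowed:
--             result[key] = val
--     return result
-- ===== Notes on version B (the rewrite author's own statement) =====
-- stated objective: alternative
-- what changed: B first selects the matching wookiee records by a list comprehension against the planet's fixed name, then merges and filters in one streaming pass over the flattened key-value stream planet.items() + all match items, relying on dict assignment (last value wins, first position wins) instead of A's repeated planet.update + per-match rebuild of the filtered dict with a nested items() loop.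
import Mathlib
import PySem

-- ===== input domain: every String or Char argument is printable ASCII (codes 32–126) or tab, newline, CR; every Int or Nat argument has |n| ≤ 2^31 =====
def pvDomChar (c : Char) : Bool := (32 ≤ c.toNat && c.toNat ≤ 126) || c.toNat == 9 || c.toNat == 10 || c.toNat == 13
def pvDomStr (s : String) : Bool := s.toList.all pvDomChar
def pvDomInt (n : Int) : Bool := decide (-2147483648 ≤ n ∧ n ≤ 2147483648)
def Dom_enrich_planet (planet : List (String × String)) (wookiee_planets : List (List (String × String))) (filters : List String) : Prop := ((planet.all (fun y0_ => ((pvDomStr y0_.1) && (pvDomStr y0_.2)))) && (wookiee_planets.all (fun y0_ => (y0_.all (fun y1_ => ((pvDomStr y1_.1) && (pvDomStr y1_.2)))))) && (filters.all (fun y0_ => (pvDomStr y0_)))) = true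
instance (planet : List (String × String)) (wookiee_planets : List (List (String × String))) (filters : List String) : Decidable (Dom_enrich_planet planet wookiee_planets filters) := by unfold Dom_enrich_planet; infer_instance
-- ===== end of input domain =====

-- B selects the matching records up front and builds the result by one streaming pass of
-- dict assignment over the flattened stream planet.items() + all match items, instead of
-- A's evolving-dict match loop that rebuilds the filtered dict at every match; objective:
-- alternative. Both A and B mutate < planet > in place identically (dict.update); the
-- equivalence proved here is about the return value.

-- ===== PORT A =====
def enrich_planet (planet : List (String × String)) (wookiee_planets : List (List (String × String))) (filters : List String) : List (String × String) :=
  (wookiee_planets.foldl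
    (fun (st : PySem.Dict String String × PySem.Dict String String) wp =>
      if st.1.get? "name" = (PySem.Dict.mk wp).get? "name" then
        ((st.1.update wp),
         ((st.1.update wp).items.foldl
            (fun pu kv => if filters.contains kv.1 then pu.insert kv.1 kv.2 else pu) st.2))
      else st)
    (PySem.Dict.mk planet, PySem.Dict.empty)).2.items

-- ===== PORT B =====
def enrich_planet_alt (planet : List (String × String)) (wookiee_planets : List (List (String × String))) (filters : List String) : List (String × String) :=
  let p := PySem.Dict.mk planet
  let matchList := wookiee_planets.filter (fun wp => p.get? "name" = (PySem.Dict.mk wp).get? "name")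
  let entries := p.items ++ matchList.flatMap (fun wp => (PySem.Dict.mk wp).items)
  if matchList.isEmpty then []
  else
    let allowed := PySem.Set.ofList filters
    (entries.foldl
      (fun r kv => if allowed.contains kv.1 then r.insert kv.1 kv.2 else r)
      PySem.Dict.empty).items

-- ===== PRECONDITION & SPEC =====
-- Pre_ excludes (a) inputs where Python A raises KeyError ('name' missing from planet while
-- wookiee_planets is nonempty, or from some wookiee planet), and (b) association lists with
-- duplicate keys, which do not represent Python dicts at all (a Python dict never has two
-- equal keys, so no Python input is excluded by (b)).
def Pre_enrich_planet (planet : List (String × String)) (wookiee_planets : List (List (String × String))) (_filters : List String) : Prop :=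
  (planet.map Prod.fst).Nodup ∧
  (∀ wp ∈ wookiee_planets, (wp.map Prod.fst).Nodup) ∧
  (wookiee_planets ≠ [] → "name" ∈ planet.map Prod.fst) ∧
  (∀ wp ∈ wookiee_planets, "name" ∈ wp.map Prod.fst)
instance (planet : List (String × String)) (wookiee_planets : List (List (String × String))) (filters : List String) : Decidable (Pre_enrich_planet planet wookiee_planets filters) := by unfold Pre_enrich_planet; infer_instance

def pvWitness_enrich_planet : (List (String × String)) × (List (List (String × String))) × List String :=
  ([("name", "Tatooine"), ("region", "Outer Rim")],
   [[("name", "Tatooine"), ("population", "200000")]],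
   ["name", "population"])

def Spec_enrich_planet (planet : List (String × String)) (wookiee_planets : List (List (String × String))) (filters : List String) (out : List (String × String)) : Prop := out = enrich_planet_alt planet wookiee_planets filters
instance (planet : List (String × String)) (wookiee_planets : List (List (String × String))) (filters : List String) (out : List (String × String)) : Decidable (Spec_enrich_planet planet wookiee_planets filters out) := by unfold Spec_enrich_planet; infer_instance

-- ===== CLAIM (what is proved, stated in full; the proofs are below) =====
def Claim_equal_enrich_planet : Prop := ∀ (planet : List (String × String)) (wookiee_planets : List (List (String × String))) (filters : List String), Dom_enrich_planet planet wookiee_planets filters → Pre_enrich_planet planet wookiee_planets filters → Spec_enrich_planet planet wookiee_planets filters (enrich_planet planet wookiee_planets filters)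

-- ===== LEMMAS AND PROOFS =====

def pvLook (q : List (String × String)) (kv : String × String) : String × String :=
  match (PySem.Dict.mk q).get? kv.1 with
  | some v => (kv.1, v)
  | none => kv

lemma pvLook_cons_self (k v : String) (t : List (String × String)) (x : String × String)
    (hx : x.1 = k) : pvLook ((k, v) :: t) x = (x.1, v) := by
  unfold pvLook
  rw [PySem.Dict.get?_mk_cons]
  simp [hx]

lemma pvLook_cons_ne (k v : String) (t : List (String × String)) (x : String × String)
    (hx : x.1 ≠ k) : pvLook ((k, v) :: t) x = pvLook t x := by
  unfold pvLook
  rw [PySem.Dict.get?_mk_cons]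
  simp [Ne.symm hx]

lemma pvLook_not_mem (t : List (String × String)) (x : String × String)
    (hx : x.1 ∉ t.map Prod.fst) : pvLook t x = x := by
  unfold pvLook
  have : (PySem.Dict.mk t).get? x.1 = none := by
    rw [PySem.Dict.get?_eq_none_iff_not_mem_keys]
    exact hx
  rw [this]

lemma pvLook_fst (q : List (String × String)) (kv : String × String) : (pvLook q kv).1 = kv.1 := by
  unfold pvLook; cases (PySem.Dict.mk q).get? kv.1 <;> simp

lemma pvG (pr : String → Bool) :
    ∀ (q : List (String × String)) (pu : PySem.Dict String String),
      (q.map Prod.fst).Nodup → pu.keys.Nodup →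
      (q.foldl (fun pu kv => if pr kv.1 then pu.insert kv.1 kv.2 else pu) pu).items
        = pu.items.map (fun kv => if pr kv.1 then pvLook q kv else kv)
          ++ q.filter (fun kv => pr kv.1 && !(pu.contains kv.1)) := by
  intro q
  induction q with
  | nil =>
    intro pu _ _
    simp [pvLook, PySem.Dict.get?]
  | cons kv t ih =>
    intro pu hq hpu
    obtain ⟨k, v⟩ := kv
    simp only [List.map_cons, List.nodup_cons, List.mem_map] at hq
    obtain ⟨hknot, hqt⟩ := hq
    have hkt : k ∉ t.map Prod.fst := by
      simp only [List.mem_map]; exact hknot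
    by_cases hc : pr k = true
    · by_cases hk : pu.contains k = true
      · -- overwrite in place
        have hpu' : (pu.insert k v).keys.Nodup := PySem.Dict.nodup_keys_insert pu k v hpu
        have hrec := ih (pu.insert k v) hqt hpu'
        simp only [List.foldl_cons, hc, if_true]
        rw [hrec, PySem.Dict.items_insert_of_contains pu v hk, List.map_map]
        congr 1
        · apply List.map_congr_left
          intro x _
          by_cases hx : x.1 = k
          · simp only [Function.comp, hx, beq_self_eq_true, if_true, hc]
            rw [pvLook_cons_self k v t x hx, pvLook_not_mem t (k, v) hkt]
            simp [hx]
          · have : (x.1 == k) = false := by simp [hx]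
            simp only [Function.comp, this, Bool.false_eq_true, if_false]
            by_cases hp : pr x.1 = true
            · simp only [hp, if_true]
              rw [pvLook_cons_ne k v t x hx]
            · simp [hp]
        · rw [List.filter_cons]
          simp only [hc, hk, Bool.not_true, Bool.and_false, Bool.false_eq_true, if_false]
          apply List.filter_congr
          intro x hx
          have hxk : x.1 ≠ k := by
            intro h
            exact (hknot ⟨x, hx, h⟩).elim
          rw [PySem.Dict.contains_insert]
          have hb : (x.1 == k) = false := by simp [hxk]
          simp [hb]
      · -- append fresh entry
        have hpu' : (pu.insert k v).keys.Nodup := PySem.Dict.nodup_keys_insert pu k v hpu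
        have hrec := ih (pu.insert k v) hqt hpu'
        simp only [List.foldl_cons, hc, if_true]
        rw [hrec, PySem.Dict.items_insert_of_not_contains pu v (by simpa using hk)]
        rw [List.map_append, List.append_assoc, List.filter_cons]
        simp only [hc, (by simpa using hk : pu.contains k = false), Bool.not_false, Bool.and_true, if_true]
        have hfk : k ∉ pu.items.map Prod.fst := by
          intro hmem
          apply hk
          simp only [PySem.Dict.contains, List.any_eq_true]
          obtain ⟨x, hx, hx1⟩ := List.mem_map.mp hmem
          exact ⟨x, hx, by simp [hx1]⟩
        have hmap1 : List.map (fun kv => if pr kv.1 = true then pvLook t kv else kv) [(k, v)] = [(k, v)] := by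
          simp only [List.map_cons, List.map_nil, hc, if_true]
          rw [pvLook_not_mem t (k, v) hkt]
        rw [hmap1]
        congr 1
        · apply List.map_congr_left
          intro x hx
          have hxk : x.1 ≠ k := fun h => hfk (List.mem_map.mpr ⟨x, hx, h⟩)
          by_cases hp : pr x.1 = true
          · simp only [hp, if_true]
            rw [pvLook_cons_ne k v t x hxk]
          · simp [hp]
        · simp only [List.singleton_append, List.cons.injEq, true_and]
          apply List.filter_congr
          intro x hx
          have hxk : x.1 ≠ k := by
            intro h
            exact (hknot ⟨x, hx, h⟩).elim
          rw [PySem.Dict.contains_insert]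
          have hb : (x.1 == k) = false := by simp [hxk]
          simp [hb]
    · -- key filtered out: pu unchanged
      have hrec := ih pu hqt hpu
      simp only [List.foldl_cons, hc, Bool.false_eq_true, if_false]
      rw [hrec, List.filter_cons]
      simp only [hc, Bool.false_and, Bool.false_eq_true, if_false]
      congr 1
      apply List.map_congr_left
      intro x _
      by_cases hp : pr x.1 = true
      · have hx : x.1 ≠ k := fun h => by rw [h] at hp; exact hc hp
        simp only [hp, if_true]
        rw [pvLook_cons_ne k v t x hx]
      · simp [hp]

lemma pvUpdate_items (q : List (String × String)) (d : PySem.Dict String String)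
    (hq : (q.map Prod.fst).Nodup) (hd : d.keys.Nodup) :
    (d.update q).items = d.items.map (pvLook q) ++ q.filter (fun kv => !(d.contains kv.1)) := by
  have h := pvG (fun _ => true) q d hq hd
  simpa [PySem.Dict.update] using h

lemma pvContains_of_mem (pu : PySem.Dict String String) (x : String × String)
    (hx : x ∈ pu.items) : pu.contains x.1 = true := by
  simp only [PySem.Dict.contains, List.any_eq_true]
  exact ⟨x, hx, by simp⟩

lemma pvStep (filters : List String) (p : PySem.Dict String String) (pu : PySem.Dict String String)
    (wp : List (String × String)) (hp : p.keys.Nodup) (hw : (wp.map Prod.fst).Nodup)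
    (hpu : pu.items = p.items.filter (fun kv => filters.contains kv.1) ∨ pu.items = []) :
    ((p.update wp).items.foldl
        (fun pu kv => if filters.contains kv.1 then pu.insert kv.1 kv.2 else pu) pu).items
      = (p.update wp).items.filter (fun kv => filters.contains kv.1) := by
  have hp' : (p.update wp).keys.Nodup := PySem.Dict.nodup_keys_update p wp hp
  have hq' : ((p.update wp).items.map Prod.fst).Nodup := hp'
  have hpun : pu.keys.Nodup := by
    show (pu.items.map Prod.fst).Nodup
    rcases hpu with h | h
    · rw [h]
      exact List.Nodup.sublist (List.Sublist.map Prod.fst List.filter_sublist) hp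
    · rw [h]; exact List.nodup_nil
  have hG := pvG (fun s => filters.contains s) (p.update wp).items pu hq' hpun
  simp only [] at hG
  rw [hG]
  rcases hpu with hfil | hnil
  · -- pu holds the filtered view of p
    have hUP := pvUpdate_items wp p hw hp
    -- the map part
    have hmap : pu.items.map (fun kv => if filters.contains kv.1 then pvLook (p.update wp).items kv else kv)
        = (p.items.filter (fun kv => filters.contains kv.1)).map (pvLook wp) := by
      rw [hfil]
      apply List.map_congr_left
      intro kv hkv
      have hpr : filters.contains kv.1 = true := (List.mem_filter.mp hkv).2
      simp only [hpr, if_true]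
      have heta : (kv.1, (pvLook wp kv).2) = pvLook wp kv := by
        rw [← pvLook_fst wp kv]
      have hmemU : (kv.1, (pvLook wp kv).2) ∈ (p.update wp).items := by
        rw [hUP, heta]
        exact List.mem_append_left _ (List.mem_map_of_mem (List.mem_of_mem_filter hkv))
      have hget : (PySem.Dict.mk (p.update wp).items).get? kv.1 = some ((pvLook wp kv).2) :=
        PySem.Dict.get?_of_mem_items _ hmemU hp'
      show (match (PySem.Dict.mk (p.update wp).items).get? kv.1 with
            | some v => (kv.1, v)
            | none => kv) = pvLook wp kv
      rw [hget]
      exact heta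
    rw [hmap]
    -- over the re-mapped old entries of p nothing survives the "not already collected" test
    have hdead : (p.items.map (pvLook wp)).filter
        (fun kv => filters.contains kv.1 && !pu.contains kv.1) = [] := by
      rw [List.filter_eq_nil_iff]
      intro y hy
      obtain ⟨x, hx, hxy⟩ := List.mem_map.mp hy
      by_cases hpr : filters.contains y.1 = true
      · have hxpu : x.1 = y.1 := by rw [← hxy, pvLook_fst]
        have hxmem : x ∈ pu.items := by
          rw [hfil]
          exact List.mem_filter.mpr ⟨hx, by rw [hxpu]; exact hpr⟩
        have := pvContains_of_mem pu x hxmem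
        rw [hxpu] at this
        simp [this]
      · simp only [List.contains_iff_mem] at hpr
        simp [hpr]
    -- over the fresh wp entries the "not already collected" test is vacuous
    have hfresh : (wp.filter (fun kv => !p.contains kv.1)).filter
          (fun kv => filters.contains kv.1 && !pu.contains kv.1)
        = (wp.filter (fun kv => !p.contains kv.1)).filter (fun kv => filters.contains kv.1) := by
      apply List.filter_congr
      intro x hx
      have hnp : p.contains x.1 = false := by
        have := (List.mem_filter.mp hx).2
        simpa using this
      have hnpu : pu.contains x.1 = false := by
        by_contra hco
        have hco' : pu.contains x.1 = true := by
          cases h : pu.contains x.1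
          · exact absurd h hco
          · rfl
        simp only [PySem.Dict.contains, List.any_eq_true] at hco'
        obtain ⟨z, hz, hz1⟩ := hco'
        rw [hfil] at hz
        have hzp : z ∈ p.items := List.mem_of_mem_filter hz
        have : p.contains x.1 = true := by
          simp only [PySem.Dict.contains, List.any_eq_true]
          exact ⟨z, hzp, hz1⟩
        rw [this] at hnp; exact Bool.true_eq_false.mp hnp
      simp [hnpu]
    have h1 : (p.update wp).items.filter (fun kv => filters.contains kv.1 && !pu.contains kv.1)
        = (wp.filter (fun kv => !p.contains kv.1)).filter (fun kv => filters.contains kv.1) := by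
      rw [hUP, List.filter_append, hdead, List.nil_append]
      exact hfresh
    have h2 : (p.update wp).items.filter (fun kv => filters.contains kv.1)
        = (p.items.filter (fun kv => filters.contains kv.1)).map (pvLook wp)
          ++ (wp.filter (fun kv => !p.contains kv.1)).filter (fun kv => filters.contains kv.1) := by
      rw [hUP, List.filter_append]
      congr 1
      rw [List.filter_map]
      congr 1
      apply List.filter_congr
      intro x _
      simp only [Function.comp_apply]
      rw [pvLook_fst]
    rw [h1, h2]
  · -- pu is empty: nothing to overwrite, nothing already present
    have hcontains : ∀ k, pu.contains k = false := by
      intro k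
      simp only [PySem.Dict.contains, hnil, List.any_nil]
    simp [hnil, hcontains]

lemma pvOuter (filters : List String) :
    ∀ (wps : List (List (String × String))) (p pu : PySem.Dict String String) (m : Bool),
      p.keys.Nodup → (∀ wp ∈ wps, (wp.map Prod.fst).Nodup) →
      (pu.items = if m then p.items.filter (fun kv => filters.contains kv.1) else []) →
      ((wps.foldl
          (fun (st : PySem.Dict String String × PySem.Dict String String) wp =>
            if st.1.get? "name" = (PySem.Dict.mk wp).get? "name" then
              ((st.1.update wp),
               ((st.1.update wp).items.foldl
                  (fun pu kv => if filters.contains kv.1 then pu.insert kv.1 kv.2 else pu) st.2))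
            else st) (p, pu)).1
        = (wps.foldl
            (fun (st : PySem.Dict String String × Bool) wp =>
              if st.1.get? "name" = (PySem.Dict.mk wp).get? "name" then (st.1.update wp, true) else st)
            (p, m)).1)
      ∧ ((wps.foldl
          (fun (st : PySem.Dict String String × PySem.Dict String String) wp =>
            if st.1.get? "name" = (PySem.Dict.mk wp).get? "name" then
              ((st.1.update wp),
               ((st.1.update wp).items.foldl
                  (fun pu kv => if filters.contains kv.1 then pu.insert kv.1 kv.2 else pu) st.2))
            else st) (p, pu)).2.items
        = (if (wps.foldl
              (fun (st : PySem.Dict String String × Bool) wp =>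
                if st.1.get? "name" = (PySem.Dict.mk wp).get? "name" then (st.1.update wp, true) else st)
              (p, m)).2
           then (wps.foldl
              (fun (st : PySem.Dict String String × Bool) wp =>
                if st.1.get? "name" = (PySem.Dict.mk wp).get? "name" then (st.1.update wp, true) else st)
              (p, m)).1.items.filter (fun kv => filters.contains kv.1)
           else [])) := by
  intro wps
  induction wps with
  | nil =>
    intro p pu m _ _ hpu
    exact ⟨rfl, hpu⟩
  | cons wp t ih =>
    intro p pu m hp hall hpu
    simp only [List.foldl_cons]
    by_cases hg : p.get? "name" = (PySem.Dict.mk wp).get? "name"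
    · simp only [hg, if_true]
      apply ih (p.update wp) _ true
        (PySem.Dict.nodup_keys_update p wp hp)
        (fun w hw => hall w (List.mem_cons_of_mem wp hw))
      simp only [if_true]
      apply pvStep filters p pu wp hp (hall wp (List.mem_cons_self))
      cases m
      · right; simpa using hpu
      · left; simpa using hpu
    · simp only [hg, if_false]
      exact ih p pu m hp (fun w hw => hall w (List.mem_cons_of_mem wp hw)) hpu

-- get? after dict.update of a duplicate-free pair list: the pairs win where they bind the key
lemma pvGet_update :
    ∀ (wp : List (String × String)) (d : PySem.Dict String String) (k : String),
      (wp.map Prod.fst).Nodup →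
      (d.update wp).get? k
        = match (PySem.Dict.mk wp).get? k with
          | some v => some v
          | none => d.get? k := by
  intro wp
  induction wp with
  | nil => intro d k _; rfl
  | cons kv t ih =>
    intro d k hnd
    obtain ⟨a, b⟩ := kv
    simp only [List.map_cons, List.nodup_cons, List.mem_map] at hnd
    obtain ⟨hanot, hnt⟩ := hnd
    have hstep : (d.update ((a, b) :: t)) = ((d.insert a b).update t) := rfl
    rw [hstep, ih (d.insert a b) k hnt, PySem.Dict.get?_mk_cons]
    by_cases hk : a = k
    · subst hk
      have : (PySem.Dict.mk t).get? a = none := by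
        rw [PySem.Dict.get?_eq_none_iff_not_mem_keys]
        show a ∉ t.map Prod.fst
        simp only [List.mem_map]
        exact hanot
      simp [this, PySem.Dict.get?_insert_self]
    · have hb : (a == k) = false := by simp [hk]
      simp only [hb, Bool.false_eq_true, if_false]
      cases h : (PySem.Dict.mk t).get? k
      · simp [PySem.Dict.get?_insert_of_ne d b (Ne.symm hk)]
      · rfl

-- a matching update does not move the planet's name
lemma pvName_update (p : PySem.Dict String String) (wp : List (String × String))
    (hw : (wp.map Prod.fst).Nodup)
    (hg : p.get? "name" = (PySem.Dict.mk wp).get? "name") :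
    (p.update wp).get? "name" = p.get? "name" := by
  rw [pvGet_update wp p "name" hw]
  cases h : (PySem.Dict.mk wp).get? "name"
  · rfl
  · rw [hg, h]

-- A's evolving match test equals a one-shot filter against the planet's fixed name
lemma pvFlag :
    ∀ (wps : List (List (String × String))) (p : PySem.Dict String String) (m : Bool),
      (∀ wp ∈ wps, (wp.map Prod.fst).Nodup) →
      (wps.foldl
        (fun (st : PySem.Dict String String × Bool) wp =>
          if st.1.get? "name" = (PySem.Dict.mk wp).get? "name" then (st.1.update wp, true) else st)
        (p, m))
      = ((wps.filter (fun wp => p.get? "name" = (PySem.Dict.mk wp).get? "name")).foldl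
           (fun d wp => d.update wp) p,
         m || !(wps.filter (fun wp => p.get? "name" = (PySem.Dict.mk wp).get? "name")).isEmpty) := by
  intro wps
  induction wps with
  | nil => intro p m _; cases m <;> rfl
  | cons wp t ih =>
    intro p m hall
    rw [List.foldl_cons, List.filter_cons]
    by_cases hg : p.get? "name" = (PySem.Dict.mk wp).get? "name"
    · rw [if_pos hg, if_pos (by exact decide_eq_true hg), List.foldl_cons]
      rw [ih (p.update wp) true (fun w hw => hall w (List.mem_cons_of_mem wp hw))]
      have hname := pvName_update p wp (hall wp List.mem_cons_self) hg
      have hfil : t.filter (fun w => decide ((p.update wp).get? "name" = (PySem.Dict.mk w).get? "name"))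
          = t.filter (fun w => decide (p.get? "name" = (PySem.Dict.mk w).get? "name")) := by
        apply List.filter_congr
        intro w _
        rw [hname]
      rw [hfil]
      simp
    · rw [if_neg hg, if_neg (by simpa using hg)]
      exact ih p m (fun w hw => hall w (List.mem_cons_of_mem wp hw))

-- pu.contains after filtering: key present iff present in p with an allowed key
lemma pvContains_filter (pr : String → Bool) (p : PySem.Dict String String)
    (pu : PySem.Dict String String)
    (hpu : pu.items = p.items.filter (fun kv => pr kv.1)) (k : String) :
    pu.contains k = (p.contains k && pr k) := by
  rw [Bool.eq_iff_iff]
  simp only [PySem.Dict.contains, List.any_eq_true, Bool.and_eq_true, hpu]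
  constructor
  · rintro ⟨x, hx, hxe⟩
    obtain ⟨hxp, hprx⟩ := List.mem_filter.mp hx
    have hxk : x.1 = k := by simpa using hxe
    exact ⟨⟨x, hxp, hxe⟩, by rw [← hxk]; exact hprx⟩
  · rintro ⟨⟨x, hx, hxe⟩, hprk⟩
    have hxk : x.1 = k := by simpa using hxe
    exact ⟨x, List.mem_filter.mpr ⟨hx, by rw [hxk]; exact hprk⟩, hxe⟩

-- streaming one duplicate-free pair block through the assignment fold
-- advances the filtered view by one dict.update
lemma pvBStep (pr : String → Bool) (p pu : PySem.Dict String String)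
    (wp : List (String × String)) (hp : p.keys.Nodup) (hw : (wp.map Prod.fst).Nodup)
    (hpu : pu.items = p.items.filter (fun kv => pr kv.1)) :
    (wp.foldl (fun r kv => if pr kv.1 then r.insert kv.1 kv.2 else r) pu).items
      = (p.update wp).items.filter (fun kv => pr kv.1) := by
  have hpun : pu.keys.Nodup := by
    show (pu.items.map Prod.fst).Nodup
    rw [hpu]
    exact List.Nodup.sublist (List.Sublist.map Prod.fst List.filter_sublist) hp
  rw [pvG pr wp pu hw hpun, pvUpdate_items wp p hw hp, List.filter_append]
  congr 1
  · -- allowed entries of p, each overwritten by wp where wp binds its key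
    rw [hpu, List.filter_map]
    have hpr : (fun kv : String × String => pr kv.1) ∘ pvLook wp = fun kv => pr kv.1 := by
      funext kv
      simp only [Function.comp_apply, pvLook_fst]
    rw [hpr]
    apply List.map_congr_left
    intro x hx
    have hprx : pr x.1 = true := (List.mem_filter.mp hx).2
    simp [hprx]
  · -- fresh wp entries: not-yet-collected = not-in-p, under the allowed test
    rw [List.filter_filter]
    apply List.filter_congr
    intro x _
    rw [pvContains_filter pr p pu hpu]
    cases hprx : pr x.1
    · simp
    · simp

-- streaming every match block advances the filtered view through the whole merge
lemma pvBFold (pr : String → Bool) :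
    ∀ (ms : List (List (String × String))) (p pu : PySem.Dict String String),
      p.keys.Nodup → (∀ wp ∈ ms, (wp.map Prod.fst).Nodup) →
      pu.items = p.items.filter (fun kv => pr kv.1) →
      ((ms.flatMap (fun wp => wp)).foldl
          (fun r kv => if pr kv.1 then r.insert kv.1 kv.2 else r) pu).items
        = (ms.foldl (fun d wp => d.update wp) p).items.filter (fun kv => pr kv.1) := by
  intro ms
  induction ms with
  | nil => intro p pu _ _ hpu; simpa using hpu
  | cons wp t ih =>
    intro p pu hp hall hpu
    rw [List.flatMap_cons, List.foldl_append, List.foldl_cons]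
    exact ih (p.update wp)
      (wp.foldl (fun r kv => if pr kv.1 then r.insert kv.1 kv.2 else r) pu)
      (PySem.Dict.nodup_keys_update p wp hp)
      (fun w hw => hall w (List.mem_cons_of_mem wp hw))
      (pvBStep pr p pu wp hp (hall wp List.mem_cons_self) hpu)

lemma pvAllowed (filters : List String) (k : String) :
    (PySem.Set.ofList filters).contains k = filters.contains k := by
  simp [pysem]

-- ===== VERDICT (by name: the statement is the Claim_ definition above) =====
theorem enrich_planet_spec : Claim_equal_enrich_planet := by
  intro planet wps filters _ hpre
  unfold Spec_enrich_planet enrich_planet enrich_planet_alt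
  obtain ⟨hpn, hwn, -, -⟩ := hpre
  have hA := (pvOuter filters wps (PySem.Dict.mk planet) PySem.Dict.empty false hpn hwn rfl).2
  rw [hA, pvFlag wps (PySem.Dict.mk planet) false hwn]
  simp only [Bool.false_or]
  set p := PySem.Dict.mk planet with hp
  set ms := wps.filter (fun wp => p.get? "name" = (PySem.Dict.mk wp).get? "name") with hms
  have hmsn : ∀ wp ∈ ms, (wp.map Prod.fst).Nodup := fun wp hwp => hwn wp (List.mem_of_mem_filter hwp)
  cases ms.isEmpty
  · -- at least one match: both sides are the filtered merged dict
    simp only [Bool.not_false, if_true]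
    have hAllow : (fun (r : PySem.Dict String String) (kv : String × String) =>
          if (PySem.Set.ofList filters).contains kv.1 = true then r.insert kv.1 kv.2 else r)
        = fun r kv => if filters.contains kv.1 = true then r.insert kv.1 kv.2 else r := by
      funext r kv
      rw [pvAllowed]
    rw [List.foldl_append, hAllow]
    have hbase : ((planet.foldl
          (fun r kv => if filters.contains kv.1 = true then r.insert kv.1 kv.2 else r)
          PySem.Dict.empty)).items = p.items.filter (fun kv => filters.contains kv.1) := by
      have hG := pvG (fun s => filters.contains s) planet PySem.Dict.empty hpn (by exact List.nodup_nil)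
      have he : (PySem.Dict.empty : PySem.Dict String String).items = [] := rfl
      simpa [he] using hG
    exact (pvBFold (fun s => filters.contains s) ms p _ hpn hmsn hbase).symm
  · -- no match: A's flag is false, B returns []
    simp
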